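-- pv_equiv track=rewrite | github.com/posit-dev/chatlas | tests/test_auto.py | convert_to_kebab_case
-- ===== SOURCE A (Python) =====
-- def convert_to_kebab_case(arr):
--     def process_string(s):
--         # Remove 'Chat' prefix if present
--         if s.startswith("Chat"):
--             s = s[4:]
--
--         # Convert the string to a list of characters
--         result = []
--         for i, char in enumerate(s):
--             # Add hyphen before uppercase letters (except first character)
--             if i > 0 and char.isupper():
--                 result.append("-")
--             result.append(char.lower())
--
--         return "".join(result)
--
--     return [process_string(s) for s in arr]
-- ===== SOURCE B (Python) =====
-- def convert_to_kebab_case(arr):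
--     def process_string(s):
--         # Strip a leading 'Chat' prefix
--         if s.startswith("Chat"):
--             s = s[4:]
--         # Boundaries first: every index i > 0 holding an uppercase letter starts a new segment
--         cuts = [i for i in range(len(s)) if i > 0 and s[i].isupper()]
--         starts = [0] + cuts
--         stops = cuts + [len(s)]
--         parts = [s[a:b] for a, b in zip(starts, stops)]
--         # Reassemble the segments with hyphens and lower-case the whole result once
--         return "-".join(parts).lower()
--     return [process_string(s) for s in arr]
-- ===== Notes on version B (the rewrite author's own statement) =====
-- stated objective: alternative
-- what changed: B computes all split boundaries first (indices i>0 with an uppercase character), slices the string into segments at those boundaries and lower-cases the '-'-joined result once, instead of A's character-by-character conditional append loop.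
import Mathlib
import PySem

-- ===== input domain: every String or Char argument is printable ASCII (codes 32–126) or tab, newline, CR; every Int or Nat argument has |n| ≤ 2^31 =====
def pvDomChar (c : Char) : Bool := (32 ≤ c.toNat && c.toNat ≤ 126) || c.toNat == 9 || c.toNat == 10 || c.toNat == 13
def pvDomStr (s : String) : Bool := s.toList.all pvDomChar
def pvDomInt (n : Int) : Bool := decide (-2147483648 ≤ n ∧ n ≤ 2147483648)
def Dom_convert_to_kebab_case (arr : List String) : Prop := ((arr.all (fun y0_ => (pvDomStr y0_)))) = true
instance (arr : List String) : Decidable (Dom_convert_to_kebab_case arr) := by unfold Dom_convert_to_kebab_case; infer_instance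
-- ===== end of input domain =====

-- B computes the split boundaries first (all i > 0 with s[i].isupper()), slices the string into
-- segments at those boundaries and lower-cases the joined result once, instead of A's
-- character-by-character append loop; objective: alternative decomposition (same cost).

-- ===== PORT A =====
-- per-string helper `process_string` of A
def pvProcessA (s : String) : String :=
  -- if s.startswith("Chat"): s = s[4:]
  let s1 : List Char :=
    if PySem.Chars.startswith s.toList ['C','h','a','t']
    then PySem.List.slice s.toList (some 4) none
    else s.toList
  -- result = []; for i, char in enumerate(s): …append…
  let result : List Char :=
    (PySem.List.enumerate s1).foldl
      (fun result ic =>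
        let result :=
          if decide (0 < ic.1) && PySem.Chars.isupper ic.2 then result ++ ['-'] else result
        result ++ [PySem.Chars.lowerChar ic.2]) []
  -- "".join(result)
  String.ofList result

def convert_to_kebab_case (arr : List String) : List String :=
  arr.map pvProcessA

-- ===== PORT B =====
-- per-string helper `process_string` of B
def pvProcessB (s : String) : String :=
  -- if s.startswith("Chat"): s = s[4:]
  let s1 : List Char :=
    if PySem.Chars.startswith s.toList ['C','h','a','t']
    then PySem.List.slice s.toList (some 4) none
    else s.toList
  -- cuts = [i for i in range(len(s)) if i > 0 and s[i].isupper()]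
  let cuts : List Int :=
    (PySem.List.pyRange 0 (s1.length : Int) 1).filter
      (fun i => decide (0 < i) && PySem.Chars.isupper (PySem.List.pyGetD s1 i ' '))
  -- starts = [0] + cuts ;  stops = cuts + [len(s)]
  let starts : List Int := (0 : Int) :: cuts
  let stops : List Int := cuts ++ [(s1.length : Int)]
  -- parts = [s[a:b] for a, b in zip(starts, stops)]
  let parts : List (List Char) :=
    (starts.zip stops).map (fun p => PySem.List.slice s1 (some p.1) (some p.2))
  -- "-".join(parts).lower()
  String.ofList (PySem.Chars.lower (PySem.Chars.join ['-'] parts))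

def convert_to_kebab_case_alt (arr : List String) : List String :=
  arr.map pvProcessB

-- ===== PRECONDITION & SPEC =====
def Spec_convert_to_kebab_case (arr : List String) (out : List String) : Prop := out = convert_to_kebab_case_alt arr
instance (arr : List String) (out : List String) : Decidable (Spec_convert_to_kebab_case arr out) := by unfold Spec_convert_to_kebab_case; infer_instance

-- ===== CLAIM (what is proved, stated in full; the proofs are below) =====
def Claim_equal_convert_to_kebab_case : Prop := ∀ (arr : List String), Dom_convert_to_kebab_case arr → Spec_convert_to_kebab_case arr (convert_to_kebab_case arr)

-- ===== LEMMAS AND PROOFS =====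

-- proof-side spec: the stripped string with '-' inserted before each uppercase (head exempt)
def pvInsT : List Char → List Char
  | [] => []
  | c :: r => (if PySem.Chars.isupper c then ['-'] else []) ++ c :: pvInsT r

def pvInsH : List Char → List Char
  | [] => []
  | c :: r => c :: pvInsT r

-- positions (counted from j) of the uppercase characters of a list
def pvUpPos : List Char → Nat → List Nat
  | [], _ => []
  | c :: r, j => (if PySem.Chars.isupper c then [j] else []) ++ pvUpPos r (j + 1)

theorem pvUpPos_le {ys : List Char} {j x : Nat} (h : x ∈ pvUpPos ys j) : j ≤ x := by
  induction ys generalizing j with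
  | nil => simp [pvUpPos] at h
  | cons c r ih =>
    simp only [pvUpPos, List.mem_append] at h
    rcases h with h | h
    · split at h <;> simp at h; omega
    · have := ih h; omega

-- ===== A-side characterisation =====

theorem pvEnumerate_flatMap (r : List Char) (s : Int) (hs : 1 ≤ s) :
    (PySem.List.enumerate r s).flatMap
      (fun ic => (if decide (0 < ic.1) && PySem.Chars.isupper ic.2 then ['-'] else []) ++
                 [PySem.Chars.lowerChar ic.2])
      = (pvInsT r).map PySem.Chars.lowerChar := by
  induction r generalizing s with
  | nil => simp [PySem.List.enumerate, pvInsT]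
  | cons c r ih =>
    rw [PySem.List.enumerate_cons, List.flatMap_cons, ih (s + 1) (by omega)]
    have h0 : decide (0 < s) = true := by simpa using hs
    by_cases hu : PySem.Chars.isupper c = true <;>
      simp [pvInsT, hu, h0, show PySem.Chars.lowerChar '-' = '-' from by decide]

theorem pvCoreA (cs : List Char) :
    (PySem.List.enumerate cs).foldl
      (fun result ic =>
        let result :=
          if decide (0 < ic.1) && PySem.Chars.isupper ic.2 then result ++ ['-'] else result
        result ++ [PySem.Chars.lowerChar ic.2]) []
      = (pvInsH cs).map PySem.Chars.lowerChar := by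
  have hstep : (fun (result : List Char) (ic : Int × Char) =>
        let result :=
          if decide (0 < ic.1) && PySem.Chars.isupper ic.2 then result ++ ['-'] else result
        result ++ [PySem.Chars.lowerChar ic.2])
      = fun result ic =>
        result ++ ((if decide (0 < ic.1) && PySem.Chars.isupper ic.2 then ['-'] else []) ++
                   [PySem.Chars.lowerChar ic.2]) := by
    funext acc ic
    by_cases h : (decide (0 < ic.1) && PySem.Chars.isupper ic.2) = true <;> simp [h]
  rw [hstep, PySem.List.foldl_append_eq_flatMap]
  cases cs with
  | nil => simp [PySem.List.enumerate, pvInsH]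
  | cons c r =>
    rw [show (PySem.List.enumerate (c :: r) : List (Int × Char)) = PySem.List.enumerate (c :: r) 0 from rfl,
        PySem.List.enumerate_cons, List.flatMap_cons, List.nil_append,
        pvEnumerate_flatMap r (0 + 1) (by omega)]
    simp [pvInsH]

-- ===== B-side characterisation =====

theorem pvJoin_head_cons (x : Char) (p : List Char) (ps : List (List Char)) :
    PySem.Chars.join ['-'] ((x :: p) :: ps) = x :: PySem.Chars.join ['-'] (p :: ps) := by
  cases ps with
  | nil => rw [PySem.Chars.join_singleton, PySem.Chars.join_singleton]
  | cons q rest => rw [PySem.Chars.join_cons_cons, PySem.Chars.join_cons_cons]; simp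

theorem pvFilterRange' (ys : List Char) : ∀ (s : Nat) (cs : List Char), cs.drop s = ys →
    (List.range' s ys.length).filter (fun i => PySem.Chars.isupper (cs.getD i ' '))
      = pvUpPos ys s := by
  induction ys with
  | nil => intro s cs _; simp [pvUpPos]
  | cons c t ih =>
    intro s cs hdrop
    have hget : cs[s]? = some c := by
      have h0 := congrArg (fun l : List Char => l[0]?) hdrop
      simpa [List.getElem?_drop] using h0
    have hdrop' : cs.drop (s + 1) = t := by
      have h1 := congrArg (fun l : List Char => l.drop 1) hdrop
      simpa [List.drop_drop, Nat.add_comm] using h1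
    rw [List.length_cons, List.range'_succ, List.filter_cons]
    have ihh := ih (s + 1) cs hdrop'
    simp only [List.getD_eq_getElem?_getD] at ihh
    by_cases hu : PySem.Chars.isupper c = true <;>
      simp [pvUpPos, List.getD_eq_getElem?_getD, hget, hu, ihh]

-- the Nat-level cuts list
theorem pvNatCuts (cs : List Char) :
    (List.range cs.length).filter (fun i => decide (0 < i) && PySem.Chars.isupper (cs.getD i ' '))
      = pvUpPos (cs.drop 1) 1 := by
  cases cs with
  | nil => simp [pvUpPos]
  | cons c r =>
    rw [List.range_eq_range', List.length_cons, List.range'_succ, List.filter_cons]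
    have h2 : ∀ i ∈ List.range' 1 r.length,
        (decide (0 < i) && PySem.Chars.isupper ((c :: r).getD i ' '))
          = PySem.Chars.isupper ((c :: r).getD i ' ') := by
      intro i hi
      have : 1 ≤ i := (List.mem_range'_1.mp hi).1
      simp [show 0 < i from this]
    rw [if_neg (by simp), List.filter_congr h2,
        pvFilterRange' r 1 (c :: r) (by rfl)]
    rfl

-- the cuts list of B, reduced to Nat and to pvUpPos
theorem pvCuts_eq (cs : List Char) :
    ((PySem.List.pyRange 0 (cs.length : Int) 1).filter
        (fun i => decide (0 < i) && PySem.Chars.isupper (PySem.List.pyGetD cs i ' ')))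
      = (pvUpPos (cs.drop 1) 1).map (fun k : Nat => (k : Int)) := by
  rw [PySem.List.pyRange_zero_nat, List.filter_map]
  have hpred : ∀ k ∈ List.range cs.length,
      ((fun i => decide (0 < i) && PySem.Chars.isupper (PySem.List.pyGetD cs i ' ')) ∘
        (fun k : Nat => (k : Int))) k
        = (fun k => decide (0 < k) && PySem.Chars.isupper (cs.getD k ' ')) k := by
    intro k _
    simp [PySem.List.pyGetD_natCast]
  rw [List.filter_congr hpred, pvNatCuts]

-- main lemma: joining the slices between consecutive cut positions inserts '-' before each
-- uppercase character after position a
theorem pvMain (ys : List Char) : ∀ (a : Nat) (cs : List Char),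
    cs.drop (a + 1) = ys → a < cs.length →
    PySem.Chars.join ['-']
      (((a :: pvUpPos ys (a + 1)).zip (pvUpPos ys (a + 1) ++ [cs.length])).map
        (fun p => (cs.drop p.1).take (p.2 - p.1)))
      = pvInsH (cs.drop a) := by
  induction ys with
  | nil =>
    intro a cs hdrop ha
    have hda : cs.drop a = [cs[a]] := by
      rw [List.drop_eq_getElem_cons ha, hdrop]
    simp only [pvUpPos, List.nil_append, List.zip_cons_cons, List.zip_nil_left,
      List.map_cons, List.map_nil, PySem.Chars.join_singleton]
    rw [hda]
    have hlen : cs.length = a + 1 := by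
      have := congrArg List.length hdrop
      simp at this; omega
    simp [hlen, pvInsH, pvInsT]
  | cons c t ih =>
    intro a cs hdrop ha
    have hdrop' : cs.drop (a + 1 + 1) = t := by
      have h1 := congrArg (fun l : List Char => l.drop 1) hdrop
      simpa [List.drop_drop, Nat.add_comm] using h1
    have ha' : a + 1 < cs.length := by
      have := congrArg List.length hdrop
      simp at this; omega
    have hstep : cs.drop a = cs[a] :: cs.drop (a + 1) := List.drop_eq_getElem_cons ha
    have hih := ih (a + 1) cs hdrop' ha'
    by_cases hu : PySem.Chars.isupper c = true
    · -- a new segment starts at position a+1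
      rw [show pvUpPos (c :: t) (a + 1) = (a + 1) :: pvUpPos t (a + 1 + 1) by simp [pvUpPos, hu]]
      -- the tail zip is nonempty: destructure pvUpPos t (a+2) ++ [cs.length]
      rcases hz : pvUpPos t (a + 1 + 1) ++ [cs.length] with _ | ⟨h, zs⟩
      · exact absurd hz (by simp)
      rw [hz] at hih
      simp only [List.zip_cons_cons, List.map_cons] at hih
      simp only [List.cons_append, List.zip_cons_cons, List.map_cons]
      rw [hz]
      simp only [List.zip_cons_cons, List.map_cons]
      have hfirst : (cs.drop a).take (a + 1 - a) = [cs[a]] := by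
        rw [show a + 1 - a = 1 from by omega, hstep]; rfl
      rw [hfirst, PySem.Chars.join_cons_cons, hih]
      rw [hstep, hdrop]
      simp [pvInsH, pvInsT, hu]
    · -- no cut at a+1: the first segment extends
      rw [show pvUpPos (c :: t) (a + 1) = pvUpPos t (a + 1 + 1) by simp [pvUpPos, hu]]
      rcases hz : pvUpPos t (a + 1 + 1) ++ [cs.length] with _ | ⟨h, zs⟩
      · exact absurd hz (by simp)
      rw [hz] at hih
      have hah : a + 1 ≤ h := by
        have hmem : h ∈ pvUpPos t (a + 1 + 1) ++ [cs.length] := by rw [hz]; simp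
        rcases List.mem_append.mp hmem with hm | hm
        · have := pvUpPos_le hm; omega
        · simp at hm; omega
      simp only [List.zip_cons_cons, List.map_cons] at hih
      simp only [List.zip_cons_cons, List.map_cons]
      have hfirst : (cs.drop a).take (h - a) = cs[a] :: (cs.drop (a + 1)).take (h - (a + 1)) := by
        rw [hstep, show h - a = (h - (a + 1)) + 1 from by omega]; rfl
      rw [hfirst, pvJoin_head_cons, hih]
      rw [hstep, hdrop]
      simp [pvInsH, pvInsT, hu]

-- B's per-string core equals the '-'-insertion spec
theorem pvCoreB (cs : List Char) :
    PySem.Chars.join ['-']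
      ((((0 : Int) :: ((PySem.List.pyRange 0 (cs.length : Int) 1).filter
            (fun i => decide (0 < i) && PySem.Chars.isupper (PySem.List.pyGetD cs i ' ')))).zip
          (((PySem.List.pyRange 0 (cs.length : Int) 1).filter
            (fun i => decide (0 < i) && PySem.Chars.isupper (PySem.List.pyGetD cs i ' '))) ++
            [(cs.length : Int)])).map
        (fun p => PySem.List.slice cs (some p.1) (some p.2)))
      = pvInsH cs := by
  rw [pvCuts_eq]
  have hcast : ((0 : Int) :: (pvUpPos (cs.drop 1) 1).map (fun k : Nat => (k : Int)))
      = ((0 :: pvUpPos (cs.drop 1) 1).map (fun k : Nat => (k : Int))) := by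
    simp only [List.map_cons, Nat.cast_zero]
  have hcast2 : ((pvUpPos (cs.drop 1) 1).map (fun k : Nat => (k : Int)) ++ [(cs.length : Int)])
      = ((pvUpPos (cs.drop 1) 1 ++ [cs.length]).map (fun k : Nat => (k : Int))) := by simp
  rw [hcast, hcast2, List.zip_map, List.map_map]
  have hpt : ((fun p : Int × Int => PySem.List.slice cs (some p.1) (some p.2)) ∘
        Prod.map (fun k : Nat => (k : Int)) (fun k : Nat => (k : Int)))
      = fun p : Nat × Nat => (cs.drop p.1).take (p.2 - p.1) := by
    funext p
    simp [Function.comp, Prod.map, PySem.List.slice_natCast]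
  rw [hpt]
  cases cs with
  | nil => simp [pvUpPos, pvInsH, PySem.Chars.join_singleton]
  | cons c r =>
    have := pvMain (List.drop 1 (c :: r)) 0 (c :: r) (by rfl) (by simp)
    simpa using this
  -- (the nil case: cuts = [], one empty part, join = [], pvInsH [] = [])

-- per-string equality
theorem pvProcess_eq (s : String) : pvProcessB s = pvProcessA s := by
  show String.ofList _ = String.ofList _
  congr 1
  rw [pvCoreA]
  rw [pvCoreB]
  rfl

-- ===== VERDICT (by name: the statement is the Claim_ definition above) =====
theorem convert_to_kebab_case_spec : Claim_equal_convert_to_kebab_case := by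
  intro arr _
  unfold Spec_convert_to_kebab_case convert_to_kebab_case convert_to_kebab_case_alt
  exact (List.map_congr_left fun s _ => (pvProcess_eq s)).symm
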